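-- pv_equiv track=rewrite | github.com/DrSqua/AlfredTheButler-Discordbot | alfred_commands.py | check_autorespond_dict
-- ===== SOURCE A (Python) =====
-- def check_autorespond_dict(response_dictionary, message,
--                            return_multiple=False):  # Takes a dictionary and a long string, returns value in dict
--     match = [key_tupl for key_tupl in tuple(response_dictionary.keys()) if
--              [key for key in key_tupl if key in message]]  # List comprehensions for the w
--     if match:  # If match is not Empty
--         if return_multiple:  # If you want to return multiple
--             return tuple([response_dictionary.get(key) for key in match])  # Give all values returned in a tuple
--         else:
--             key_len = tuple(map(lambda x: len(max(x, key=len)), match))  # Returns tuple of len(key_tuple)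
--             return response_dictionary.get(match[key_len.index(
--                 max(key_len))])  # Gets the index of max len, then uses index for key in match[] then returs value
--     else:
--         return False
-- ===== SOURCE B (Python) =====
-- def check_autorespond_dict(response_dictionary, message, return_multiple=False):
--     def matched(key_tupl):
--         return any(kw in message for kw in key_tupl)
--
--     items = list(response_dictionary.items())
--     if return_multiple:
--         hits = tuple(value for key_tupl, value in items if matched(key_tupl))
--         return hits if hits else False
--     # Stable descending sort by each tuple's longest keyword length, then the
--     # first matched entry in that order is the answer (stability preserves the
--     # original dict order among equal lengths, reproducing A's first-max pick).
--     ranked = sorted(items, key=lambda it: max(map(len, it[0]), default=0), reverse=True)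
--     for key_tupl, value in ranked:
--         if matched(key_tupl):
--             return value
--     return False
-- ===== Notes on version B (the rewrite author's own statement) =====
-- stated objective: faster
-- what changed: A collects the matching key tuples, builds a parallel list of their max keyword lengths and argmaxes it with index(max) before a final dict lookup; B instead stably sorts the items once in descending order of longest keyword length and returns the value of the first matching item in that order (stability reproduces A's first-max tie-break).
-- outside the precondition, e.g. on check_autorespond_dict({}, 'x', False): A returns False, B returns False; on check_autorespond_dict({('a',): 'v'}, 'abc', True): A returns ('v',), B returns ('v',)
import Mathlib
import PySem

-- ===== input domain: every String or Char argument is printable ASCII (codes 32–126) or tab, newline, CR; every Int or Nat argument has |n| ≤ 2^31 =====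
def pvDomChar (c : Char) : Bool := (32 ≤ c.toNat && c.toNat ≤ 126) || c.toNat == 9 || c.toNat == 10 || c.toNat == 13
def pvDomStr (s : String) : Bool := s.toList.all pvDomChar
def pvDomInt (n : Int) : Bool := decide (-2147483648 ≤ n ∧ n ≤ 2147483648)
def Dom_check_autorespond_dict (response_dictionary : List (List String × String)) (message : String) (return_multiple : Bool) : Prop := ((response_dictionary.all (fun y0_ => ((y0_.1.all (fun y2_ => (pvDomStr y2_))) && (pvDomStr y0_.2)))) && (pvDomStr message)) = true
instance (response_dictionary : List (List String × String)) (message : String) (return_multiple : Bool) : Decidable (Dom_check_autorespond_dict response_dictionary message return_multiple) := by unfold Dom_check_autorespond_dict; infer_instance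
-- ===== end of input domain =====

-- B replaces A's collect-then-argmax (match list, key_len list, max, index, lookup) by one stable
-- descending sort on longest-keyword length followed by a scan for the first matching item;
-- equivalence is about the RETURN value (neither version mutates its arguments).

-- ===== PORT A =====
def check_autorespond_dict (response_dictionary : List (List String × String)) (message : String) (return_multiple : Bool) : Option String :=
  let d := PySem.Dict.ofList response_dictionary
  let mtch := (PySem.Dict.keys d).filter
      (fun key_tupl => !(key_tupl.filter (fun key => PySem.Str.isIn key message)).isEmpty)
  if !mtch.isEmpty then
    if return_multiple then
      none  -- Python returns a TUPLE of values here, not an Optional[str]; excluded by Pre_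
    else
      -- maxD's default "" is unreachable: every x in mtch contains a matching keyword, so x ≠ []
      let key_len := mtch.map (fun x => PySem.Str.len (PySem.List.maxD x PySem.Str.len ""))
      match PySem.List.max? key_len (fun y => y) with
      | none => none       -- unreachable: mtch ≠ [] so key_len ≠ []
      | some mx =>
        match PySem.List.index? key_len mx with
        | none => none     -- unreachable: mx ∈ key_len
        | some idx =>
          match PySem.List.pyGet? mtch (idx : Int) with
          | none => none   -- unreachable: idx < mtch.length
          | some key => PySem.Dict.get? d key
  else
    none  -- Python returns False here, not an Optional[str]; excluded by Pre_

-- ===== PORT B =====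
-- Source B's key: max(map(len, it[0]), default=0)
def pvG (kt : List String) : Int := PySem.List.maxD (kt.map PySem.Str.len) (fun y => y) 0

def check_autorespond_dict_alt (response_dictionary : List (List String × String)) (message : String) (return_multiple : Bool) : Option String :=
  let items := (PySem.Dict.ofList response_dictionary).items
  if return_multiple then
    none  -- Source B returns a tuple or False here, neither an Optional[str]; excluded by Pre_
  else
    let ranked := PySem.List.sorted items (fun it => pvG it.1) true
    match ranked.find? (fun it => it.1.any (fun kw => PySem.Str.isIn kw message)) with
    | some it => some it.2
    | none => none  -- Source B returns False here, not an Optional[str]; excluded by Pre_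

-- ===== PRECONDITION & SPEC =====
-- Pre_ excludes exactly the inputs on which A returns a value that is NOT of the declared
-- Optional[str] type, unrepresentable as Option String: the literal False when no keyword
-- matches, and the tuple of values when return_multiple is true with a match (B's Python
-- reproduces both of those returns exactly; only the Lean ports cannot express them).
def Pre_check_autorespond_dict (response_dictionary : List (List String × String)) (message : String) (return_multiple : Bool) : Prop :=
  return_multiple = false ∧
  (response_dictionary.any (fun p => p.1.any (fun kw => PySem.Str.isIn kw message))) = true
instance (response_dictionary : List (List String × String)) (message : String) (return_multiple : Bool) : Decidable (Pre_check_autorespond_dict response_dictionary message return_multiple) := by unfold Pre_check_autorespond_dict; infer_instance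

def pvWitness_check_autorespond_dict : (List (List String × String)) × String × Bool :=
  ([(["hi"], "hello")], "hi there", false)

def Spec_check_autorespond_dict (response_dictionary : List (List String × String)) (message : String) (return_multiple : Bool) (out : Option String) : Prop := out = check_autorespond_dict_alt response_dictionary message return_multiple
instance (response_dictionary : List (List String × String)) (message : String) (return_multiple : Bool) (out : Option String) : Decidable (Spec_check_autorespond_dict response_dictionary message return_multiple out) := by unfold Spec_check_autorespond_dict; infer_instance

-- ===== CLAIM (what is proved, stated in full; the proofs are below) =====
def Claim_equal_check_autorespond_dict : Prop := ∀ (response_dictionary : List (List String × String)) (message : String) (return_multiple : Bool), Dom_check_autorespond_dict response_dictionary message return_multiple → Pre_check_autorespond_dict response_dictionary message return_multiple → Spec_check_autorespond_dict response_dictionary message return_multiple (check_autorespond_dict response_dictionary message return_multiple)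

-- ===== LEMMAS AND PROOFS =====

-- first-maximum accumulator: the element an in-order scan keeps when only a STRICTLY
-- larger key may replace the current best (so the first maximal element wins)
def pvStep {α : Type} (g : α → Int) (best : Option α) (x : α) : Option α :=
  match best with
  | none => some x
  | some q => if g q < g x then some x else some q

def pvFM {α : Type} (g : α → Int) (F : List α) : Option α := F.foldl (pvStep g) none

theorem pv_filter_not_isEmpty (kt : List String) (p : String → Bool) :
    (!(kt.filter p).isEmpty) = kt.any p := by
  induction kt with
  | nil => rfl
  | cons x xs ih => by_cases h : p x <;> simp [h, ih]

theorem pv_ofList_eq (rd : List (List String × String)) :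
    PySem.Dict.ofList rd = rd.foldl (fun d p => d.insert p.1 p.2) PySem.Dict.empty := by
  simp [PySem.Dict.ofList, PySem.Dict.update]

theorem pv_mem_keys_ofList (rd : List (List String × String)) (k : List String) :
    k ∈ (PySem.Dict.ofList rd).keys ↔ k ∈ rd.map (·.1) := by
  rw [pv_ofList_eq, PySem.Dict.keys_foldl_insert_key rd (·.1) (fun _ p => p.2) PySem.Dict.empty,
      PySem.Set.mem_update]
  simp [PySem.Dict.keys_empty]

theorem pv_le_pvG {kw : String} {kt : List String} (h : kw ∈ kt) :
    PySem.Str.len kw ≤ pvG kt := by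
  cases hmax : PySem.List.max? (kt.map PySem.Str.len) (fun y => y) with
  | none =>
      rw [PySem.List.max?_eq_none_iff] at hmax
      simp [List.map_eq_nil_iff] at hmax
      subst hmax; cases h
  | some M =>
      have hle := PySem.List.max?_isMax hmax (PySem.Str.len kw) (List.mem_map_of_mem h)
      simpa [pvG, PySem.List.maxD, hmax] using hle

theorem pv_klen_eq_pvG {kt : List String} (h : kt ≠ []) :
    PySem.Str.len (PySem.List.maxD kt PySem.Str.len "") = pvG kt := by
  cases hmax : PySem.List.max? kt PySem.Str.len with
  | none => rw [PySem.List.max?_eq_none_iff] at hmax; exact absurd hmax h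
  | some m =>
      have hm : m ∈ kt := PySem.List.max?_mem hmax
      have h1 : PySem.Str.len m ≤ pvG kt := pv_le_pvG hm
      have h2 : pvG kt ≤ PySem.Str.len m := by
        cases hmax2 : PySem.List.max? (kt.map PySem.Str.len) (fun y => y) with
        | none =>
            rw [PySem.List.max?_eq_none_iff, List.map_eq_nil_iff] at hmax2
            exact absurd hmax2 h
        | some M =>
            have hM : M ∈ kt.map PySem.Str.len := PySem.List.max?_mem hmax2
            rw [List.mem_map] at hM
            obtain ⟨y, hy, rfl⟩ := hM
            have := PySem.List.max?_isMax hmax y hy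
            simpa [pvG, PySem.List.maxD, hmax2] using this
      have hv : PySem.List.maxD kt PySem.Str.len "" = m := by
        simp [PySem.List.maxD, hmax]
      rw [hv]
      exact le_antisymm h1 h2

theorem pv_keys_eq {κ ν : Type} [BEq κ] (d : PySem.Dict κ ν) :
    PySem.Dict.keys d = d.items.map (·.1) := by
  simp [PySem.Dict.keys]

-- inserting x into a descending list: the first p-match afterwards is exactly the
-- pvStep-update of the first p-match before (x only wins by a STRICTLY larger key)
theorem pv_find_insertBy {α : Type} (g : α → Int) (p : α → Bool) (x : α) :
    ∀ (acc : List α), acc.Pairwise (fun a b => g b ≤ g a) →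
      (PySem.List.insertBy (fun a b => decide (g b < g a)) x acc).find? p
        = if p x then pvStep g (acc.find? p) x else acc.find? p := by
  intro acc
  induction acc with
  | nil =>
      intro _
      by_cases hx : p x <;> simp [PySem.List.insertBy, List.find?, hx, pvStep]
  | cons y ys ih =>
      intro hpw
      have hpw' : ys.Pairwise (fun a b => g b ≤ g a) := hpw.tail
      have hyle : ∀ r ∈ ys, g r ≤ g y := fun r hr => (List.pairwise_cons.mp hpw).1 r hr
      by_cases hins : g y < g x
      · -- x goes in front: every element of y :: ys has key ≤ g y < g x
        have hres : PySem.List.insertBy (fun a b => decide (g b < g a)) x (y :: ys)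
            = x :: y :: ys := by
          simp [PySem.List.insertBy, hins]
        rw [hres]
        by_cases hx : p x
        · rw [List.find?_cons_of_pos hx, if_pos hx]
          cases hfind : (y :: ys).find? p with
          | none => simp [pvStep]
          | some q =>
              have hq : q ∈ y :: ys := List.mem_of_find?_eq_some hfind
              have hqy : g q ≤ g y := by
                rcases List.mem_cons.mp hq with rfl | hq'
                · exact le_refl _
                · exact hyle q hq'
              have : g q < g x := lt_of_le_of_lt hqy hins
              simp [pvStep, this]
        · rw [List.find?_cons_of_neg (by simpa using hx), if_neg (by simpa using hx)]
      · -- x goes further down: head stays, recurse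
        have hres : PySem.List.insertBy (fun a b => decide (g b < g a)) x (y :: ys)
            = y :: PySem.List.insertBy (fun a b => decide (g b < g a)) x ys := by
          simp [PySem.List.insertBy, hins]
        rw [hres]
        by_cases hy : p y
        · rw [List.find?_cons_of_pos hy, List.find?_cons_of_pos hy]
          by_cases hx : p x
          · have : ¬ g y < g x := hins
            simp [hx, pvStep, this]
          · simp [hx]
        · rw [List.find?_cons_of_neg (by simpa using hy),
              List.find?_cons_of_neg (by simpa using hy)]
          exact ih hpw'

-- the scan of the stable descending sort finds exactly the first-max of the matches
theorem pv_find_sorted {α : Type} (g : α → Int) (p : α → Bool) (xs : List α) :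
    (PySem.List.sorted xs (fun a => g a) true).find? p = pvFM g (xs.filter p) := by
  induction xs using List.reverseRecOn with
  | nil => rfl
  | append_singleton xs x ih =>
      have hsnoc : PySem.List.sorted (xs ++ [x]) (fun a => g a) true
          = PySem.List.insertBy (fun a b => decide (g b < g a)) x
              (PySem.List.sorted xs (fun a => g a) true) := by
        rw [PySem.List.sorted_rev_eq_foldl_insertBy, PySem.List.sorted_rev_eq_foldl_insertBy,
            List.foldl_append]
        rfl
      have hpw : (PySem.List.sorted xs (fun a => g a) true).Pairwise
          (fun a b => g b ≤ g a) := PySem.List.sorted_pairwise_rev xs (fun a => g a)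
      rw [hsnoc, pv_find_insertBy g p x _ hpw, ih]
      by_cases hx : p x
      · simp [hx, pvFM, List.filter_append, List.foldl_append]
      · simp [hx, pvFM, List.filter_append]

-- the first-max fold, characterised: from best q0 it either keeps q0 (nothing strictly
-- larger follows) or lands on the FIRST element strictly above everything before it
-- and at least everything after it
theorem pv_fold_spec {α : Type} (g : α → Int) :
    ∀ (F : List α) (q0 : α),
      (F.foldl (pvStep g) (some q0) = some q0 ∧ ∀ r ∈ F, g r ≤ g q0)
    ∨ (∃ pre q suf, F = pre ++ q :: suf ∧ F.foldl (pvStep g) (some q0) = some q ∧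
        g q0 < g q ∧ (∀ r ∈ pre, g r < g q) ∧ (∀ r ∈ suf, g r ≤ g q)) := by
  intro F
  induction F with
  | nil => intro q0; exact Or.inl ⟨rfl, by simp⟩
  | cons x rest ih =>
      intro q0
      by_cases hx : g q0 < g x
      · have hstep : List.foldl (pvStep g) (some q0) (x :: rest)
            = List.foldl (pvStep g) (some x) rest := by
          simp [List.foldl_cons, pvStep, hx]
        rcases ih x with ⟨heq, hall⟩ | ⟨pre, q, suf, hF, heq, hlt, hpre, hsuf⟩
        · refine Or.inr ⟨[], x, rest, by simp, ?_, hx, by simp, hall⟩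
          rw [hstep, heq]
        · refine Or.inr ⟨x :: pre, q, suf, by simp [hF], ?_, lt_trans hx hlt, ?_, hsuf⟩
          · rw [hstep, heq]
          · intro r hr
            rcases List.mem_cons.mp hr with rfl | hr
            · exact hlt
            · exact hpre r hr
      · have hstep : List.foldl (pvStep g) (some q0) (x :: rest)
            = List.foldl (pvStep g) (some q0) rest := by
          simp [List.foldl_cons, pvStep, hx]
        rcases ih q0 with ⟨heq, hall⟩ | ⟨pre, q, suf, hF, heq, hlt, hpre, hsuf⟩
        · refine Or.inl ⟨by rw [hstep, heq], ?_⟩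
          intro r hr
          rcases List.mem_cons.mp hr with rfl | hr
          · omega
          · exact hall r hr
        · refine Or.inr ⟨x :: pre, q, suf, by simp [hF], by rw [hstep, heq], hlt, ?_, hsuf⟩
          intro r hr
          rcases List.mem_cons.mp hr with rfl | hr
          · omega
          · exact hpre r hr

theorem pv_fm_spec {α : Type} (g : α → Int) (F : List α) (hne : F ≠ []) :
    ∃ pre q suf, F = pre ++ q :: suf ∧ pvFM g F = some q ∧
      (∀ r ∈ pre, g r < g q) ∧ (∀ r ∈ suf, g r ≤ g q) := by
  cases F with
  | nil => exact absurd rfl hne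
  | cons x rest =>
      have hstep : pvFM g (x :: rest) = rest.foldl (pvStep g) (some x) := by
        simp [pvFM, List.foldl_cons, pvStep]
      rcases pv_fold_spec g rest x with ⟨heq, hall⟩ | ⟨pre, q, suf, hF, heq, hlt, hpre, hsuf⟩
      · exact ⟨[], x, rest, by simp, by rw [hstep, heq], by simp, hall⟩
      · refine ⟨x :: pre, q, suf, by simp [hF], by rw [hstep, heq], ?_, hsuf⟩
        intro r hr
        rcases List.mem_cons.mp hr with rfl | hr
        · exact hlt
        · exact hpre r hr

-- ===== VERDICT (by name: the statement is the Claim_ definition above) =====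
theorem check_autorespond_dict_spec : Claim_equal_check_autorespond_dict := by
  intro rd message rm _ hpre
  obtain ⟨hrm, hany⟩ := hpre
  subst hrm
  unfold Spec_check_autorespond_dict
  -- F: the matched items of the dict, in order
  set p : List String × String → Bool :=
    fun it => it.1.any (fun kw => PySem.Str.isIn kw message) with hp
  set F : List (List String × String) := (PySem.Dict.ofList rd).items.filter p with hF
  -- some item matches: F is nonempty
  obtain ⟨q0', hq0', hq0m'⟩ := List.any_eq_true.mp hany
  have hkmem : q0'.1 ∈ (PySem.Dict.ofList rd).items.map (·.1) := by
    rw [← pv_keys_eq]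
    exact (pv_mem_keys_ofList rd q0'.1).mpr (List.mem_map_of_mem hq0')
  obtain ⟨q0, hq0L, hq0k⟩ := List.mem_map.mp hkmem
  have hq0F : q0 ∈ F := by
    rw [hF, List.mem_filter]
    exact ⟨hq0L, by rw [hp]; simp only []; rw [hq0k]; exact hq0m'⟩
  have hFne : F ≠ [] := List.ne_nil_of_mem hq0F
  -- the first-max decomposition of F
  obtain ⟨pre, q, suf, hFd, hfm, hpre, hsuf⟩ :=
    pv_fm_spec (fun it => pvG it.1) F hFne
  -- every element of F (in particular q) is matched
  have hmem : ∀ r ∈ pre ++ q :: suf, p r = true := by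
    intro r hr
    have hr' : r ∈ F := by rw [hFd]; exact hr
    exact (List.mem_filter.mp (by rwa [hF] at hr')).2
  have hqm : p q = true := hmem q (by simp)
  -- B returns some q.2
  have hB : check_autorespond_dict_alt rd message false = some q.2 := by
    have halt : check_autorespond_dict_alt rd message false
        = (match (PySem.List.sorted (PySem.Dict.ofList rd).items
              (fun it => pvG it.1) true).find? p with
           | some it => some it.2
           | none => none) := rfl
    rw [halt, pv_find_sorted (fun it => pvG it.1) p (PySem.Dict.ofList rd).items, ← hF, hfm]
  rw [hB]
  -- A returns some q.2 too
  have hAeq : check_autorespond_dict rd message false =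
      (if (!((PySem.Dict.ofList rd).keys.filter
            (fun key_tupl => !(key_tupl.filter (fun key => PySem.Str.isIn key message)).isEmpty)).isEmpty) = true then
         match PySem.List.max? (((PySem.Dict.ofList rd).keys.filter
             (fun key_tupl => !(key_tupl.filter (fun key => PySem.Str.isIn key message)).isEmpty)).map
             (fun x => PySem.Str.len (PySem.List.maxD x PySem.Str.len ""))) (fun y => y) with
         | none => none
         | some mx =>
           match PySem.List.index? (((PySem.Dict.ofList rd).keys.filter
               (fun key_tupl => !(key_tupl.filter (fun key => PySem.Str.isIn key message)).isEmpty)).map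
               (fun x => PySem.Str.len (PySem.List.maxD x PySem.Str.len ""))) mx with
           | none => none
           | some idx =>
             match PySem.List.pyGet? ((PySem.Dict.ofList rd).keys.filter
                 (fun key_tupl => !(key_tupl.filter (fun key => PySem.Str.isIn key message)).isEmpty)) (idx : Int) with
             | none => none
             | some key => PySem.Dict.get? (PySem.Dict.ofList rd) key
       else none) := rfl
  have hmtch : (PySem.Dict.ofList rd).keys.filter
      (fun key_tupl => !(key_tupl.filter (fun key => PySem.Str.isIn key message)).isEmpty)
      = (pre ++ q :: suf).map (·.1) := by
    rw [pv_keys_eq]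
    rw [show (fun key_tupl => !(key_tupl.filter (fun key => PySem.Str.isIn key message)).isEmpty)
        = (fun key_tupl : List String => key_tupl.any (fun key => PySem.Str.isIn key message)) from
      funext (fun kt => pv_filter_not_isEmpty kt _)]
    rw [List.filter_map]
    rw [show ((fun key_tupl : List String => key_tupl.any (fun key => PySem.Str.isIn key message)) ∘
          (fun r : List String × String => r.1)) = p from rfl]
    rw [← hF, hFd]
  have hkl : ((pre ++ q :: suf).map (·.1)).map
      (fun x => PySem.Str.len (PySem.List.maxD x PySem.Str.len ""))
      = (pre ++ q :: suf).map (fun r => pvG r.1) := by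
    rw [List.map_map]
    apply List.map_congr_left
    intro r hr
    obtain ⟨kw, hkw, -⟩ := List.any_eq_true.mp (hmem r hr)
    exact pv_klen_eq_pvG (List.ne_nil_of_mem hkw)
  have hmax : PySem.List.max? ((pre ++ q :: suf).map (fun r => pvG r.1)) (fun y => y)
      = some (pvG q.1) := by
    cases hm : PySem.List.max? ((pre ++ q :: suf).map (fun r => pvG r.1)) (fun y => y) with
    | none => rw [PySem.List.max?_eq_none_iff] at hm; simp at hm
    | some M =>
      have h1 : pvG q.1 ≤ M := PySem.List.max?_isMax hm _ (by simp)
      have hMmem := PySem.List.max?_mem hm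
      rw [List.mem_map] at hMmem
      obtain ⟨r, hr, hrM⟩ := hMmem
      have h2 : M ≤ pvG q.1 := by
        rcases List.mem_append.mp hr with h | h
        · rw [← hrM]; exact le_of_lt (hpre r h)
        · rcases List.mem_cons.mp h with rfl | h
          · rw [← hrM]
          · rw [← hrM]; exact hsuf r h
      rw [show M = pvG q.1 from le_antisymm h2 h1]
  have hidx : PySem.List.index? ((pre ++ q :: suf).map (fun r => pvG r.1)) (pvG q.1)
      = some pre.length := by
    rw [PySem.List.index?_eq_some_iff]
    refine ⟨pre.map (fun r => pvG r.1), suf.map (fun r => pvG r.1), by simp, by simp, ?_⟩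
    intro hcon
    rw [List.mem_map] at hcon
    obtain ⟨r, hr, hEq⟩ := hcon
    have := hpre r hr
    omega
  have hget : PySem.List.pyGet? ((pre ++ q :: suf).map (·.1)) ((pre.length : Nat) : Int)
      = some q.1 := by
    have h := PySem.List.pyGet?_append_length
      (pre.map (fun r : List String × String => r.1)) (suf.map (fun r : List String × String => r.1)) q.1
    simp only [List.length_map] at h
    simpa using h
  have hgetq : PySem.Dict.get? (PySem.Dict.ofList rd) q.1 = some q.2 := by
    have hqF : q ∈ F := by rw [hFd]; simp
    have hqL : (q.1, q.2) ∈ (PySem.Dict.ofList rd).items := by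
      simpa using List.mem_of_mem_filter (by rwa [hF] at hqF)
    exact PySem.Dict.get?_of_mem_items _ hqL (PySem.Dict.nodup_keys_ofList rd)
  rw [hAeq, hmtch, hkl]
  rw [if_pos (by simp)]
  simp only [hmax, hidx, hget, hgetq]
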